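-- pv_equiv track=rewrite | github.com/linksequel/dailycodes | leetcode/editor/cn/[209]长度最小的子数组.py | judge_n_windows_satisfy
-- ===== SOURCE A (Python) =====
-- from typing import List
--
-- def judge_n_windows_satisfy(target:int, size:int, nums: List[int]) ->  bool:
--     startp, endp = 0, size
--     while endp < len(nums):
--         if sum(nums[startp:endp+1]) >= target:
--             return True
--         startp += 1
--         endp += 1
--     return False
-- ===== SOURCE B (Python) =====
-- def judge_n_windows_satisfy(target: int, size: int, nums) -> bool:
--     w = size + 1  # A checks windows nums[startp:endp+1], i.e. of length size+1
--     if w <= 0 or w > len(nums):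
--         return False
--     s = sum(nums[:w])
--     if s >= target:
--         return True
--     for i in range(w, len(nums)):
--         s += nums[i] - nums[i - w]
--         if s >= target:
--             return True
--     return False
-- ===== Notes on version B (the rewrite author's own statement) =====
-- stated objective: faster
-- what changed: Replaces re-summing each window slice with a single-pass sliding window that updates one running sum incrementally.
-- outside the precondition, e.g. on judge_n_windows_satisfy(3, -2, [1, 2, 3]): A returns True, B returns False
import Mathlib
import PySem

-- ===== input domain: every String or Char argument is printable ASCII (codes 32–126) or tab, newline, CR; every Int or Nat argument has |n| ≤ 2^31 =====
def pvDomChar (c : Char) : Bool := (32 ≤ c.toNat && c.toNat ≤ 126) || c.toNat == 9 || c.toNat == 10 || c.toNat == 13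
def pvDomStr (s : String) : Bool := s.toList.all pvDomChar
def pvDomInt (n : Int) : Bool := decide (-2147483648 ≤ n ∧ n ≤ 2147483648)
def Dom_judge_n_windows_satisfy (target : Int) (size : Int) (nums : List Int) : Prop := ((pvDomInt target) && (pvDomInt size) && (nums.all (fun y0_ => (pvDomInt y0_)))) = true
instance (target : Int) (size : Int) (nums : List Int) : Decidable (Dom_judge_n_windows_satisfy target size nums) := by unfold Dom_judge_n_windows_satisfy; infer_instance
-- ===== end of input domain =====

-- B replaces A's per-window slice re-summation with a single-pass sliding window
-- keeping one incrementally updated running sum (measured faster; agreement proved for size ≥ 0).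


-- ===== PORT A =====
-- while endp < len(nums): if sum(nums[startp:endp+1]) >= target: return True; startp += 1; endp += 1
def pvALoop (target : Int) (nums : List Int) (startp endp : Int) : Bool :=
  if _h : endp < (nums.length : Int) then
    if (PySem.List.slice nums (some startp) (some (endp + 1))).sum ≥ target then true
    else pvALoop target nums (startp + 1) (endp + 1)
  else false
termination_by ((nums.length : Int) - endp).toNat
decreasing_by omega

def judge_n_windows_satisfy (target : Int) (size : Int) (nums : List Int) : Bool :=
  pvALoop target nums 0 size

-- ===== PORT B =====
-- for i in range(w, len(nums)): s += nums[i] - nums[i - w]; if s >= target: return True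
def pvBLoop (target : Int) (nums : List Int) (w : Nat) (s : Int) (i : Nat) : Bool :=
  if _h : i < nums.length then
    let s' := s + nums.getD i 0 - nums.getD (i - w) 0
    if s' ≥ target then true else pvBLoop target nums w s' (i + 1)
  else false
termination_by nums.length - i

def judge_n_windows_satisfy_alt (target : Int) (size : Int) (nums : List Int) : Bool :=
  let w : Int := size + 1
  if w ≤ 0 ∨ (nums.length : Int) < w then false
  else
    let wn := w.toNat
    let s := (nums.take wn).sum
    if s ≥ target then true else pvBLoop target nums wn s wn

-- ===== PRECONDITION & SPEC =====
-- Pre_ restricts to the task's natural domain size ≥ 0: for negative size A's answer comes from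
-- Python's negative-index slicing (accidental windows), outside the fixed-window task.
def Pre_judge_n_windows_satisfy (target : Int) (size : Int) (nums : List Int) : Prop := 0 ≤ size
instance (target : Int) (size : Int) (nums : List Int) : Decidable (Pre_judge_n_windows_satisfy target size nums) := by unfold Pre_judge_n_windows_satisfy; infer_instance
def pvWitness_judge_n_windows_satisfy : Int × Int × List Int := (5, 1, [2, 3, 4])

def Spec_judge_n_windows_satisfy (target : Int) (size : Int) (nums : List Int) (out : Bool) : Prop := out = judge_n_windows_satisfy_alt target size nums
instance (target : Int) (size : Int) (nums : List Int) (out : Bool) : Decidable (Spec_judge_n_windows_satisfy target size nums out) := by unfold Spec_judge_n_windows_satisfy; infer_instance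

-- ===== CLAIM (what is proved, stated in full; the proofs are below) =====
def Claim_equal_judge_n_windows_satisfy : Prop := ∀ (target : Int) (size : Int) (nums : List Int), Dom_judge_n_windows_satisfy target size nums → Pre_judge_n_windows_satisfy target size nums → Spec_judge_n_windows_satisfy target size nums (judge_n_windows_satisfy target size nums)

-- ===== LEMMAS AND PROOFS =====

-- Common reference: sum of the window of length w starting at k, and "some window from k on reaches target".
def pvWinSum (nums : List Int) (w k : Nat) : Int := ((nums.drop k).take w).sum

def pvAnyWin (target : Int) (nums : List Int) (w k : Nat) : Bool :=
  if _h : k + w ≤ nums.length then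
    (decide (pvWinSum nums w k ≥ target) || pvAnyWin target nums w (k + 1))
  else false
termination_by nums.length + 1 - k
decreasing_by omega

lemma pvWinSum_shift (nums : List Int) (w k : Nat) (hw : 1 ≤ w) (h : k + w < nums.length) :
    pvWinSum nums w (k + 1) = pvWinSum nums w k + nums.getD (k + w) 0 - nums.getD k 0 := by
  obtain ⟨m, rfl⟩ : ∃ m, w = m + 1 := ⟨w - 1, by omega⟩
  have hk : k < nums.length := by omega
  have hkw : k + (m + 1) < nums.length := h
  have hdrop : nums.drop k = nums[k] :: nums.drop (k + 1) := List.drop_eq_getElem_cons hk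
  have hget? : (nums.drop (k + 1))[m]? = some nums[k + (m + 1)] := by
    rw [List.getElem?_drop]
    have : k + 1 + m = k + (m + 1) := by omega
    rw [this, List.getElem?_eq_getElem hkw]
  have h1 : pvWinSum nums (m + 1) k = nums[k] + (List.take m (List.drop (k + 1) nums)).sum := by
    rw [pvWinSum, hdrop, List.take_succ_cons, List.sum_cons]
  have h2 : pvWinSum nums (m + 1) (k + 1)
      = (List.take m (List.drop (k + 1) nums)).sum + nums[k + (m + 1)] := by
    rw [pvWinSum, List.take_add_one, hget?, List.sum_append, Option.toList_some,
      List.sum_cons, List.sum_nil]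
    ring
  rw [h1, h2, List.getD_eq_getElem _ _ hk, List.getD_eq_getElem _ _ hkw]
  ring

lemma pvBLoop_eq (target : Int) (nums : List Int) (w : Nat) (hw : 1 ≤ w) :
    ∀ k, pvBLoop target nums w (pvWinSum nums w k) (k + w) = pvAnyWin target nums w (k + 1) := by
  have H : ∀ fuel k, nums.length ≤ k + w + fuel →
      pvBLoop target nums w (pvWinSum nums w k) (k + w) = pvAnyWin target nums w (k + 1) := by
    intro fuel
    induction fuel with
    | zero =>
      intro k hk
      rw [pvBLoop, pvAnyWin, dif_neg (by omega), dif_neg (by omega)]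
    | succ f ih =>
      intro k hk
      rw [pvBLoop, pvAnyWin]
      by_cases h : k + w < nums.length
      · rw [dif_pos h, dif_pos (by omega)]
        have hs' : pvWinSum nums w k + nums.getD (k + w) 0 - nums.getD (k + w - w) 0
            = pvWinSum nums w (k + 1) := by
          rw [show k + w - w = k from by omega, pvWinSum_shift nums w k hw h]
        simp only [hs']
        by_cases hc : pvWinSum nums w (k + 1) ≥ target
        · rw [if_pos hc, decide_eq_true hc, Bool.true_or]
        · rw [if_neg hc, decide_eq_false hc, Bool.false_or,
            show k + w + 1 = (k + 1) + w from by omega]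
          exact ih (k + 1) (by omega)
      · rw [dif_neg (by omega), dif_neg (by omega)]
  exact fun k => H nums.length k (by omega)

lemma pvALoop_eq (target : Int) (nums : List Int) (size : Int) (hs : 0 ≤ size) :
    ∀ startp : Nat, pvALoop target nums (startp : Int) ((startp : Int) + size)
      = pvAnyWin target nums (size + 1).toNat startp := by
  have H : ∀ fuel startp, nums.length ≤ startp + fuel →
      pvALoop target nums (startp : Int) ((startp : Int) + size)
        = pvAnyWin target nums (size + 1).toNat startp := by
    intro fuel
    induction fuel with
    | zero =>
      intro startp hk
      rw [pvALoop, pvAnyWin, dif_neg (by omega), dif_neg (by omega)]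
    | succ f ih =>
      intro startp hk
      rw [pvALoop, pvAnyWin]
      by_cases h : (startp : Int) + size < (nums.length : Int)
      · rw [dif_pos h, dif_pos (by omega)]
        rw [show (startp : Int) + size + 1 = (startp : Int) + (((size + 1).toNat : Nat) : Int)
              from by omega,
            PySem.List.slice_natCast_add,
            show ((nums.drop startp).take (size + 1).toNat).sum
              = pvWinSum nums (size + 1).toNat startp from rfl]
        by_cases hc : pvWinSum nums (size + 1).toNat startp ≥ target
        · rw [if_pos hc, decide_eq_true hc, Bool.true_or]
        · rw [if_neg hc, decide_eq_false hc, Bool.false_or,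
            show (startp : Int) + 1 = ((startp + 1 : Nat) : Int) from by push_cast; ring,
            show (startp : Int) + (((size + 1).toNat : Nat) : Int) = ((startp + 1 : Nat) : Int) + size
              from by push_cast; omega]
          exact ih (startp + 1) (by omega)
      · rw [dif_neg h, dif_neg (by omega)]
  exact fun startp => H nums.length startp (by omega)

-- ===== VERDICT (by name: the statement is the Claim_ definition above) =====
theorem judge_n_windows_satisfy_spec : Claim_equal_judge_n_windows_satisfy := by
  intro target size nums _dom hpre
  unfold Spec_judge_n_windows_satisfy judge_n_windows_satisfy judge_n_windows_satisfy_alt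
  have hs : 0 ≤ size := hpre
  have hA : pvALoop target nums 0 size = pvAnyWin target nums (size + 1).toNat 0 := by
    simpa using pvALoop_eq target nums size hs 0
  rw [hA]
  set wn := (size + 1).toNat with hwn
  have hwn1 : 1 ≤ wn := by omega
  by_cases hlen : (nums.length : Int) < size + 1
  · rw [if_pos (Or.inr hlen), pvAnyWin, dif_neg (by omega)]
  · rw [if_neg (by omega)]
    show pvAnyWin target nums wn 0 =
      (if (List.take wn nums).sum ≥ target then true
       else pvBLoop target nums wn (List.take wn nums).sum wn)
    rw [show (List.take wn nums).sum = pvWinSum nums wn 0 from by simp [pvWinSum]]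
    rw [pvAnyWin, dif_pos (by omega)]
    by_cases hc : pvWinSum nums wn 0 ≥ target
    · rw [if_pos hc, decide_eq_true hc, Bool.true_or]
    · rw [if_neg hc, decide_eq_false hc, Bool.false_or]
      have hB := pvBLoop_eq target nums wn hwn1 0
      simp only [Nat.zero_add] at hB
      exact hB.symm
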